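-- pv_equiv track=rewrite | github.com/rashevskyv/bffnt-tools | bffnt_common.py | _addr_from_coord_macrotiled_bc4
-- ===== SOURCE A (Python) =====
-- def _compute_pixel_index_microtile(x: int, y: int, bpp_bits: int) -> int:
--     if bpp_bits == 8:
--         pb0 = x & 1; pb1 = (x & 2) >> 1; pb2 = (x & 4) >> 2
--         pb3 = (y & 2) >> 1; pb4 = y & 1; pb5 = (y & 4) >> 2
--     elif bpp_bits == 0x10:
--         pb0 = x & 1; pb1 = (x & 2) >> 1; pb2 = (x & 4) >> 2
--         pb3 = y & 1; pb4 = (y & 2) >> 1; pb5 = (y & 4) >> 2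
--     elif bpp_bits in (0x20, 0x60):
--         pb0 = x & 1; pb1 = (x & 2) >> 1; pb2 = y & 1
--         pb3 = (x & 4) >> 2; pb4 = (y & 2) >> 1; pb5 = (y & 4) >> 2
--     elif bpp_bits == 0x40:
--         pb0 = x & 1; pb1 = y & 1; pb2 = (x & 2) >> 1
--         pb3 = (x & 4) >> 2; pb4 = (y & 2) >> 1; pb5 = (y & 4) >> 2
--     elif bpp_bits == 0x80:
--         pb0 = y & 1; pb1 = x & 1; pb2 = (x & 2) >> 1
--         pb3 = (x & 4) >> 2; pb4 = (y & 2) >> 1; pb5 = (y & 4) >> 2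
--     else:
--         pb0 = x & 1; pb1 = (x & 2) >> 1; pb2 = y & 1
--         pb3 = (x & 4) >> 2; pb4 = (y & 2) >> 1; pb5 = (y & 4) >> 2
--     return (32 * pb5) | (16 * pb4) | (8 * pb3) | (4 * pb2) | pb0 | (2 * pb1)
--
-- def _pipe_from_xy(x: int, y: int) -> int:
--     return ((y >> 3) ^ (x >> 3)) & 1
--
-- def _bank_from_xy(x: int, y: int) -> int:
--     return (((y >> 5) ^ (x >> 3)) & 1) | (2 * (((y >> 4) ^ (x >> 4)) & 1))
--
-- def _addr_from_coord_macrotiled_bc4(x: int, y: int, pitch: int, height: int,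
--                                     pipe_swizzle: int = 0, bank_swizzle: int = 0) -> int:
--     micro_tile_thickness = 1
--     num_samples = 1
--     bpp_bits = 64
--     micro_tile_bits = num_samples * bpp_bits * (micro_tile_thickness * 64)
--     micro_tile_bytes = (micro_tile_bits + 7) // 8
--
--     pixel_index = _compute_pixel_index_microtile(x & 7, y & 7, bpp_bits)
--     bytes_per_sample = micro_tile_bytes // num_samples
--     sample_offset = 0
--     pixel_offset_bits = bpp_bits * pixel_index
--     elem_offset_bits = pixel_offset_bits + sample_offset
--     elem_offset = (elem_offset_bits + 7) // 8
--
--     pipe = _pipe_from_xy(x, y)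
--     bank = _bank_from_xy(x, y)
--
--     swizzle = (pipe_swizzle + 2 * bank_swizzle) & 0xFFFFFFFF
--     bank_pipe = (pipe + 2 * bank) ^ (swizzle % 8)
--     bank_pipe %= 8
--     pipe = bank_pipe % 2
--     bank = bank_pipe // 2
--
--     slice_bytes = (height * pitch * micro_tile_thickness * bpp_bits * num_samples + 7) // 8
--     slice_offset = 0
--
--     macro_tile_pitch = 32
--     macro_tile_height = 16
--
--     macro_tiles_per_row = pitch // macro_tile_pitch
--     macro_tile_bytes = (num_samples * micro_tile_thickness * bpp_bits * macro_tile_height * macro_tile_pitch + 7) // 8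
--     macro_tile_index_x = x // macro_tile_pitch
--     macro_tile_index_y = y // macro_tile_height
--
--     def compute_bank_swapped_width(pitch_blocks: int) -> int:
--         bpp = 8
--         bytesPerSample = 8 * bpp
--         bytesPerTileSlice = 1 * bytesPerSample // 1
--         factor = 1
--         swapTiles = max(1, 128 // bpp)
--         swapWidth = swapTiles * 32
--         heightBytes = 1 * factor * bpp * 2 // 1
--         swapMax = 0x4000 // heightBytes
--         swapMin = 256 // bytesPerTileSlice
--         bankSwapWidth = min(swapMax, max(swapMin, swapWidth))
--         while bankSwapWidth >= 2 * pitch_blocks: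
--             bankSwapWidth >>= 1
--         return bankSwapWidth
--
--     bank_swap_order = [0, 1, 3, 2, 6, 7, 5, 4, 0, 0]
--     bank_swapped_width = compute_bank_swapped_width(pitch)
--     if bank_swapped_width:
--         swap_index = (macro_tile_pitch * macro_tile_index_x) // bank_swapped_width
--         bank ^= bank_swap_order[swap_index & 3]
--
--     macro_tile_offset = (macro_tile_index_x + macro_tiles_per_row * macro_tile_index_y) * macro_tile_bytes
--     total_offset = elem_offset + ((macro_tile_offset + slice_offset) >> 3)
--     return (bank << 9) | (pipe << 8) | (total_offset & 255) | (((total_offset & ~255) << 3) & 0xFFFFFFFF)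
-- ===== SOURCE B (Python) =====
-- def _addr_from_coord_macrotiled_bc4(x: int, y: int, pitch: int, height: int,
--                                     pipe_swizzle: int = 0, bank_swizzle: int = 0) -> int:
--     # One-accumulator bit-field view of the 64bpp BC4 macro tiling: the byte offset
--     # is assembled in a single expression (micro-tile bits plus macro-tile index << 9),
--     # pipe and bank stay packed in one 3-bit word throughout, the bank-swap value is
--     # the Gray code of the 2-bit swap column, and the swap width is a closed-form
--     # power of two (no halving loop).
--     xm, ym = x & 7, y & 7
--     offset = (((xm & 1) | ((ym & 1) << 1) | ((xm & 6) << 1) | ((ym & 6) << 3)) << 3) \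
--              + (((x >> 5) + (pitch >> 5) * (y >> 4)) << 9)
--     bp = ((((y >> 3) ^ (x >> 3)) & 1)
--           | ((((y >> 5) ^ (x >> 3)) & 1) << 1)
--           | ((((y >> 4) ^ (x >> 4)) & 1) << 2)) ^ ((pipe_swizzle + 2 * bank_swizzle) & 7)
--     shift = min(9, (2 * pitch - 1).bit_length() - 1)
--     si = (32 * (x >> 5)) >> shift
--     bp ^= ((si & 3) ^ ((si >> 1) & 1)) << 1  # Gray code of the swap index
--     bank, pipe = bp >> 1, bp & 1
--     return (bank << 9) | (pipe << 8) | (offset & 255) | (((offset & ~255) << 3) & 0xFFFFFFFF)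
-- ===== Notes on version B (the rewrite author's own statement) =====
-- stated objective: alternative
-- what changed: B takes a bit-field view: it assembles the byte offset in one accumulator expression (micro-tile bits plus macro-tile index shifted in, floor divisions replaced by arithmetic shifts), keeps pipe and bank packed in a single 3-bit word through the whole swizzle instead of A's separate pipe/bank variables with mod/floordiv re-extraction, replaces A's 10-entry bank_swap_order table lookup by the Gray code of the swap index, and replaces the while-halving loop for the bank-swapped width by a closed-form power of two via bit_length.
-- outside the precondition, e.g. on _addr_from_coord_macrotiled_bc4(0, 0, 0, 0, 0, 0): A does not finish within the time limit, B returns 0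
import Mathlib
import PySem

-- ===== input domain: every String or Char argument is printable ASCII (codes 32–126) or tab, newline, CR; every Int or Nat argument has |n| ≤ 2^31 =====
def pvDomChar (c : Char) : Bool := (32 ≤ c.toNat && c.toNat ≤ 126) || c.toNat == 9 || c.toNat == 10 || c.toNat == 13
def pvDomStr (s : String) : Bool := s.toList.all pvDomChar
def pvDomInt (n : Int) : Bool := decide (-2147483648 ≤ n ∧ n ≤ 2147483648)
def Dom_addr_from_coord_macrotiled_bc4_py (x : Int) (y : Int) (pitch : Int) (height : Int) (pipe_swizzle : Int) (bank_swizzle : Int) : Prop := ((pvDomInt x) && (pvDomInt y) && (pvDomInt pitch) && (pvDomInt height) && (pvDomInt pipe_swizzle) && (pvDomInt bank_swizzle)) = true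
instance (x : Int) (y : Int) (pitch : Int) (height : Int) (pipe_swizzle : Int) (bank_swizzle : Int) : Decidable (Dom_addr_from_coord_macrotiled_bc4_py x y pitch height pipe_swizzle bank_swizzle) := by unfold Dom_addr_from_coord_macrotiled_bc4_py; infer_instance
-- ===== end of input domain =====

-- B is a bit-field view of the same tiling: one offset accumulator built with shifts,
-- pipe/bank packed in one 3-bit word, Gray code instead of the swap table, and a
-- closed-form power of two instead of A's halving loop; objective: alternative.

-- ===== PORT A =====
def computePixelIndexMicrotile (x : Int) (y : Int) (bpp_bits : Int) : Int :=
  let (pb0, pb1, pb2, pb3, pb4, pb5) :=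
    if bpp_bits = 8 then
      (PySem.Int.band x 1, (PySem.Int.band x 2) >>> 1, (PySem.Int.band x 4) >>> 2,
       (PySem.Int.band y 2) >>> 1, PySem.Int.band y 1, (PySem.Int.band y 4) >>> 2)
    else if bpp_bits = 0x10 then
      (PySem.Int.band x 1, (PySem.Int.band x 2) >>> 1, (PySem.Int.band x 4) >>> 2,
       PySem.Int.band y 1, (PySem.Int.band y 2) >>> 1, (PySem.Int.band y 4) >>> 2)
    else if bpp_bits = 0x20 ∨ bpp_bits = 0x60 then
      (PySem.Int.band x 1, (PySem.Int.band x 2) >>> 1, PySem.Int.band y 1,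
       (PySem.Int.band x 4) >>> 2, (PySem.Int.band y 2) >>> 1, (PySem.Int.band y 4) >>> 2)
    else if bpp_bits = 0x40 then
      (PySem.Int.band x 1, PySem.Int.band y 1, (PySem.Int.band x 2) >>> 1,
       (PySem.Int.band x 4) >>> 2, (PySem.Int.band y 2) >>> 1, (PySem.Int.band y 4) >>> 2)
    else if bpp_bits = 0x80 then
      (PySem.Int.band y 1, PySem.Int.band x 1, (PySem.Int.band x 2) >>> 1,
       (PySem.Int.band x 4) >>> 2, (PySem.Int.band y 2) >>> 1, (PySem.Int.band y 4) >>> 2)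
    else
      (PySem.Int.band x 1, (PySem.Int.band x 2) >>> 1, PySem.Int.band y 1,
       (PySem.Int.band x 4) >>> 2, (PySem.Int.band y 2) >>> 1, (PySem.Int.band y 4) >>> 2)
  PySem.Int.bor (PySem.Int.bor (PySem.Int.bor (PySem.Int.bor (PySem.Int.bor
    (32 * pb5) (16 * pb4)) (8 * pb3)) (4 * pb2)) pb0) (2 * pb1)

def pipeFromXY (x : Int) (y : Int) : Int :=
  PySem.Int.band (PySem.Int.bxor (y >>> 3) (x >>> 3)) 1

def bankFromXY (x : Int) (y : Int) : Int :=
  PySem.Int.bor (PySem.Int.band (PySem.Int.bxor (y >>> 5) (x >>> 3)) 1)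
    ((2:Int) * PySem.Int.band (PySem.Int.bxor (y >>> 4) (x >>> 4)) 1)

-- the Python while-loop; fuel 10 suffices: the start value is 512 and each pass halves it,
-- so under Pre_ (1 ≤ pitch) the loop exits within 9 passes (for pitch ≤ 0 Python never exits)
def bankSwapLoop : Nat → Int → Int → Int
  | 0, b, _ => b
  | n + 1, b, p => if 2 * p ≤ b then bankSwapLoop n (b >>> 1) p else b

def computeBankSwappedWidth (pitch_blocks : Int) : Int :=
  let bpp : Int := 8
  let bytesPerSample := 8 * bpp
  let bytesPerTileSlice := PySem.Int.floordiv (1 * bytesPerSample) 1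
  let factor : Int := 1
  let swapTiles := max 1 (PySem.Int.floordiv 128 bpp)
  let swapWidth := swapTiles * 32
  let heightBytes := PySem.Int.floordiv (1 * factor * bpp * 2) 1
  let swapMax := PySem.Int.floordiv 0x4000 heightBytes
  let swapMin := PySem.Int.floordiv 256 bytesPerTileSlice
  let bankSwapWidth := min swapMax (max swapMin swapWidth)
  bankSwapLoop 10 bankSwapWidth pitch_blocks

def addr_from_coord_macrotiled_bc4_py (x : Int) (y : Int) (pitch : Int) (height : Int) (pipe_swizzle : Int) (bank_swizzle : Int) : Int :=
  let micro_tile_thickness : Int := 1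
  let num_samples : Int := 1
  let bpp_bits : Int := 64
  let micro_tile_bits := num_samples * bpp_bits * (micro_tile_thickness * 64)
  let micro_tile_bytes := PySem.Int.floordiv (micro_tile_bits + 7) 8
  let pixel_index := computePixelIndexMicrotile (PySem.Int.band x 7) (PySem.Int.band y 7) bpp_bits
  let _bytes_per_sample := PySem.Int.floordiv micro_tile_bytes num_samples
  let sample_offset : Int := 0
  let pixel_offset_bits := bpp_bits * pixel_index
  let elem_offset_bits := pixel_offset_bits + sample_offset
  let elem_offset := PySem.Int.floordiv (elem_offset_bits + 7) 8
  let pipe := pipeFromXY x y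
  let bank := bankFromXY x y
  let swizzle := PySem.Int.band (pipe_swizzle + 2 * bank_swizzle) 0xFFFFFFFF
  let bank_pipe := PySem.Int.bxor (pipe + 2 * bank) (PySem.Int.mod swizzle 8)
  let bank_pipe := PySem.Int.mod bank_pipe 8
  let pipe := PySem.Int.mod bank_pipe 2
  let bank := PySem.Int.floordiv bank_pipe 2
  let _slice_bytes := PySem.Int.floordiv (height * pitch * micro_tile_thickness * bpp_bits * num_samples + 7) 8
  let slice_offset : Int := 0
  let macro_tile_pitch : Int := 32
  let macro_tile_height : Int := 16
  let macro_tiles_per_row := PySem.Int.floordiv pitch macro_tile_pitch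
  let macro_tile_bytes := PySem.Int.floordiv (num_samples * micro_tile_thickness * bpp_bits * macro_tile_height * macro_tile_pitch + 7) 8
  let macro_tile_index_x := PySem.Int.floordiv x macro_tile_pitch
  let macro_tile_index_y := PySem.Int.floordiv y macro_tile_height
  let bank_swap_order : List Int := [0, 1, 3, 2, 6, 7, 5, 4, 0, 0]
  let bank_swapped_width := computeBankSwappedWidth pitch
  let bank :=
    if bank_swapped_width ≠ 0 then
      let swap_index := PySem.Int.floordiv (macro_tile_pitch * macro_tile_index_x) bank_swapped_width
      -- list index: swap_index & 3 ∈ [0,4) is in range of the 10-element list, so pyGetD is exact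
      PySem.Int.bxor bank (PySem.List.pyGetD bank_swap_order (PySem.Int.band swap_index 3) 0)
    else bank
  let macro_tile_offset := (macro_tile_index_x + macro_tiles_per_row * macro_tile_index_y) * macro_tile_bytes
  let total_offset := elem_offset + ((macro_tile_offset + slice_offset) >>> 3)
  PySem.Int.bor (PySem.Int.bor (PySem.Int.bor (bank <<< 9) (pipe <<< 8))
    (PySem.Int.band total_offset 255))
    (PySem.Int.band ((PySem.Int.band total_offset (Int.not 255)) <<< 3) 0xFFFFFFFF)

-- ===== PORT B =====
def addr_from_coord_macrotiled_bc4_py_alt (x : Int) (y : Int) (pitch : Int) (height : Int) (pipe_swizzle : Int) (bank_swizzle : Int) : Int :=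
  let xm := PySem.Int.band x 7
  let ym := PySem.Int.band y 7
  let offset := ((PySem.Int.bor (PySem.Int.bor (PySem.Int.bor
      (PySem.Int.band xm 1) ((PySem.Int.band ym 1) <<< 1)) ((PySem.Int.band xm 6) <<< 1))
      ((PySem.Int.band ym 6) <<< 3)) <<< 3)
    + (((x >>> 5) + (pitch >>> 5) * (y >>> 4)) <<< 9)
  let bp := PySem.Int.bxor
    (PySem.Int.bor (PySem.Int.bor
      (PySem.Int.band (PySem.Int.bxor (y >>> 3) (x >>> 3)) 1)
      ((PySem.Int.band (PySem.Int.bxor (y >>> 5) (x >>> 3)) 1) <<< 1))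
      ((PySem.Int.band (PySem.Int.bxor (y >>> 4) (x >>> 4)) 1) <<< 2))
    (PySem.Int.band (pipe_swizzle + 2 * bank_swizzle) 7)
  let shift := min 9 (PySem.Int.bitLength (2 * pitch - 1) - 1)
  let si := (32 * (x >>> 5)) >>> shift
  -- Gray code of the swap index
  let bp := PySem.Int.bxor bp
    ((PySem.Int.bxor (PySem.Int.band si 3) (PySem.Int.band (si >>> 1) 1)) <<< 1)
  let bank := bp >>> 1
  let pipe := PySem.Int.band bp 1
  PySem.Int.bor (PySem.Int.bor (PySem.Int.bor (bank <<< 9) (pipe <<< 8))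
    (PySem.Int.band offset 255))
    (PySem.Int.band ((PySem.Int.band offset (Int.not 255)) <<< 3) 0xFFFFFFFF)

-- ===== PRECONDITION & SPEC =====
-- Pre_ excludes pitch ≤ 0, on which A's while-loop (bankSwapWidth >= 2*pitch) never terminates.
def Pre_addr_from_coord_macrotiled_bc4_py (x : Int) (y : Int) (pitch : Int) (height : Int) (pipe_swizzle : Int) (bank_swizzle : Int) : Prop := 1 ≤ pitch
instance (x : Int) (y : Int) (pitch : Int) (height : Int) (pipe_swizzle : Int) (bank_swizzle : Int) : Decidable (Pre_addr_from_coord_macrotiled_bc4_py x y pitch height pipe_swizzle bank_swizzle) := by unfold Pre_addr_from_coord_macrotiled_bc4_py; infer_instance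

def pvWitness_addr_from_coord_macrotiled_bc4_py : Int × Int × Int × Int × Int × Int := (5, 9, 64, 32, 1, 2)

def Spec_addr_from_coord_macrotiled_bc4_py (x : Int) (y : Int) (pitch : Int) (height : Int) (pipe_swizzle : Int) (bank_swizzle : Int) (out : Int) : Prop := out = addr_from_coord_macrotiled_bc4_py_alt x y pitch height pipe_swizzle bank_swizzle
instance (x : Int) (y : Int) (pitch : Int) (height : Int) (pipe_swizzle : Int) (bank_swizzle : Int) (out : Int) : Decidable (Spec_addr_from_coord_macrotiled_bc4_py x y pitch height pipe_swizzle bank_swizzle out) := by unfold Spec_addr_from_coord_macrotiled_bc4_py; infer_instance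

-- ===== CLAIM (what is proved, stated in full; the proofs are below) =====
def Claim_equal_addr_from_coord_macrotiled_bc4_py : Prop := ∀ (x : Int) (y : Int) (pitch : Int) (height : Int) (pipe_swizzle : Int) (bank_swizzle : Int), Dom_addr_from_coord_macrotiled_bc4_py x y pitch height pipe_swizzle bank_swizzle → Pre_addr_from_coord_macrotiled_bc4_py x y pitch height pipe_swizzle bank_swizzle → Spec_addr_from_coord_macrotiled_bc4_py x y pitch height pipe_swizzle bank_swizzle (addr_from_coord_macrotiled_bc4_py x y pitch height pipe_swizzle bank_swizzle)

-- ===== LEMMAS AND PROOFS =====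

-- a & (2^k - 1) is a mod 2^k, on every Int (Python two's-complement semantics)
theorem band_mask (a : Int) (k : Nat) : PySem.Int.band a (2 ^ k - 1) = PySem.Int.mod a (2 ^ k) := by
  have hM : (0:Int) < 2 ^ k := by positivity
  have hcast : ((2:Nat) ^ k : Int) = (2:Int) ^ k := by push_cast; ring
  rw [PySem.Int.mod_eq_emod_of_pos hM]
  rcases le_or_gt 0 a with ha | ha
  · have hb : (0:Int) ≤ 2 ^ k - 1 := by omega
    simp only [PySem.Int.band, if_pos ha, if_pos hb]
    have h1 : ((2:Int) ^ k - 1).toNat = 2 ^ k - 1 := by omega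
    rw [h1, Nat.and_two_pow_sub_one_eq_mod]
    push_cast [Int.toNat_of_nonneg ha]
    ring_nf
  · have hb : (0:Int) ≤ 2 ^ k - 1 := by omega
    simp only [PySem.Int.band, if_neg (by omega : ¬ (0:Int) ≤ a), if_pos hb]
    have h1 : ((2:Int) ^ k - 1).toNat = 2 ^ k - 1 := by omega
    rw [h1, Nat.and_comm, Nat.and_two_pow_sub_one_eq_mod]
    set n := (-a - 1).toNat with hn
    have han : a = -(n:Int) - 1 := by omega
    have hrn : (n % 2 ^ k : Nat) < 2 ^ k := Nat.mod_lt _ (by positivity)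
    set r : Int := ((n % 2 ^ k : Nat) : Int) with hrdef
    have hr0 : 0 ≤ r := by positivity
    have hr1 : r < 2 ^ k := by rw [hrdef]; omega
    have hq : (n : Int) % (2 ^ k : Int) = r := by rw [hrdef]; push_cast; ring_nf
    have hnr : (n:Int) = ((n:Int) / 2 ^ k) * 2 ^ k + r := by
      rw [← hq]; linarith [Int.mul_ediv_add_emod (n:Int) (2 ^ k)]
    have h2 : a = (2 ^ k - 1 - r) + (-(((n:Int) / 2 ^ k)) - 1) * 2 ^ k := by
      rw [han]; linear_combination -hnr
    have h3 : a % (2:Int) ^ k = 2 ^ k - 1 - r := by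
      rw [h2, Int.add_mul_emod_self_right]
      exact Int.emod_eq_of_lt (by omega) (by omega)
    omega

theorem band7 (a : Int) : PySem.Int.band a 7 = PySem.Int.mod a 8 := by
  have h := band_mask a 3
  rw [show ((2:Int) ^ 3 - 1) = 7 by norm_num, show ((2:Int) ^ 3) = 8 by norm_num] at h
  exact h

theorem band3 (a : Int) : PySem.Int.band a 3 = PySem.Int.mod a 4 := by
  have h := band_mask a 2
  rw [show ((2:Int) ^ 2 - 1) = 3 by norm_num, show ((2:Int) ^ 2) = 4 by norm_num] at h
  exact h

theorem band_u32 (a : Int) : PySem.Int.band a 4294967295 = PySem.Int.mod a 4294967296 := by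
  have h := band_mask a 32
  rw [show ((2:Int) ^ 32 - 1) = 4294967295 by norm_num, show ((2:Int) ^ 32) = 4294967296 by norm_num] at h
  exact h

theorem mod8_bounds (a : Int) : 0 ≤ PySem.Int.mod a 8 ∧ PySem.Int.mod a 8 < 8 :=
  ⟨PySem.Int.mod_nonneg a (by norm_num), PySem.Int.mod_lt a (by norm_num)⟩

theorem band1_cases (a : Int) : PySem.Int.band a 1 = 0 ∨ PySem.Int.band a 1 = 1 := by
  rw [PySem.Int.band_one]
  have := PySem.Int.mod_nonneg a (b := 2) (by norm_num)
  have := PySem.Int.mod_lt a (b := 2) (by norm_num)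
  omega

-- masking with 0xFFFFFFFF and reducing mod 8 is masking with 7
theorem swz (w : Int) : PySem.Int.mod (PySem.Int.band w 4294967295) 8 = PySem.Int.band w 7 := by
  rw [band_u32, band7, PySem.Int.mod_eq_emod_of_pos (by norm_num : (0:Int) < 4294967296),
      PySem.Int.mod_eq_emod_of_pos (by norm_num : (0:Int) < 8),
      PySem.Int.mod_eq_emod_of_pos (by norm_num : (0:Int) < 8)]
  exact Int.emod_emod_of_dvd w (by norm_num)

-- floor division by a power of two is the arithmetic right shift (Python's >>)
theorem floordiv_pow2 (a : Int) (k : Nat) : PySem.Int.floordiv a ((2:Int) ^ k) = a >>> ((k:Nat) : Int) := by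
  rw [PySem.Int.floordiv_eq_ediv_of_pos (by positivity), Int.shiftRight_natCast_right,
    Int.shiftRight_eq_div_pow]
  norm_cast

-- the elem-offset of the 64bpp micro-tile pixel agrees with B's direct bit assembly
theorem pixel_eq (a b : Int) (ha0 : 0 ≤ a) (ha1 : a < 8) (hb0 : 0 ≤ b) (hb1 : b < 8) :
    PySem.Int.floordiv (64 * computePixelIndexMicrotile a b 64 + 0 + 7) 8
    = (PySem.Int.bor (PySem.Int.bor (PySem.Int.bor
        (PySem.Int.band a 1) ((PySem.Int.band b 1) <<< 1)) ((PySem.Int.band a 6) <<< 1))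
        ((PySem.Int.band b 6) <<< 3)) <<< 3 := by
  interval_cases a <;> interval_cases b <;> decide

theorem bitLength_bounds (m : Int) (hm : m ≠ 0) :
    2 ^ (PySem.Int.bitLength m - 1) ≤ m.natAbs ∧ m.natAbs < 2 ^ PySem.Int.bitLength m :=
  ⟨PySem.Int.two_pow_bitLength_le m hm, PySem.Int.lt_two_pow_bitLength m⟩

-- the halving loop started at 2^j computes 2^(min j (bitLength(2p-1) - 1))
theorem loop_pow (p : Int) (hp : 1 ≤ p) :
    ∀ (j n : Nat), j < n →
      bankSwapLoop n ((2:Int) ^ j) p = (2:Int) ^ (min j (PySem.Int.bitLength (2 * p - 1) - 1)) := by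
  have hne : 2 * p - 1 ≠ 0 := by omega
  obtain ⟨hlb, hub⟩ := bitLength_bounds (2 * p - 1) hne
  have habs : (2 * p - 1).natAbs = (2 * p - 1).toNat := by omega
  intro j
  induction j with
  | zero =>
    intro n hn
    obtain ⟨n', rfl⟩ : ∃ n', n = n' + 1 := ⟨n - 1, by omega⟩
    rw [bankSwapLoop, if_neg (show ¬ (2 * p ≤ (2:Int) ^ 0) by rw [pow_zero]; omega)]
    simp
  | succ j ih =>
    intro n hn
    obtain ⟨n', rfl⟩ : ∃ n', n = n' + 1 := ⟨n - 1, by omega⟩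
    by_cases hc : 2 * p ≤ (2:Int) ^ (j + 1)
    · have hshift : ((2:Int) ^ (j + 1)) >>> (1:Int) = (2:Int) ^ j := by
        have h1 : ((2:Int) ^ (j + 1)) = (((2 ^ (j + 1) : Nat)) : Int) := by push_cast; ring
        have h2 : (((2 ^ (j + 1) : Nat)) : Int) >>> (1:Int) = (((2 ^ (j + 1) >>> 1 : Nat)) : Int) := rfl
        have h3 : (2 ^ (j + 1) >>> 1 : Nat) = 2 ^ j := by
          rw [Nat.shiftRight_one, Nat.pow_succ]
          omega
        rw [h1, h2, h3]; push_cast; ring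
      rw [bankSwapLoop, if_pos hc, hshift, ih n' (by omega)]
      have hcast : ((2:Nat) ^ (j + 1) : Int) = (2:Int) ^ (j + 1) := by push_cast; ring
      have hblle : PySem.Int.bitLength (2 * p - 1) ≤ j + 1 := by
        by_contra hk
        push_neg at hk
        have := Nat.pow_le_pow_right (by norm_num : 1 ≤ 2) (by omega : j + 1 ≤ PySem.Int.bitLength (2 * p - 1) - 1)
        omega
      congr 1
      omega
    · rw [bankSwapLoop, if_neg hc]
      push_neg at hc
      have hcast : ((2:Nat) ^ (j + 1) : Int) = (2:Int) ^ (j + 1) := by push_cast; ring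
      have hge : j + 2 ≤ PySem.Int.bitLength (2 * p - 1) := by
        by_contra hk
        push_neg at hk
        have := Nat.pow_le_pow_right (by norm_num : 1 ≤ 2) (by omega : PySem.Int.bitLength (2 * p - 1) ≤ j + 1)
        omega
      have : min (j + 1) (PySem.Int.bitLength (2 * p - 1) - 1) = j + 1 := by omega
      rw [this]

-- A's loop equals the power of two at B's closed-form shift count
theorem bsw_eq (p : Int) (hp : 1 ≤ p) :
    computeBankSwappedWidth p = (2:Int) ^ (min 9 (PySem.Int.bitLength (2 * p - 1) - 1)) := by
  have hstart : computeBankSwappedWidth p = bankSwapLoop 10 512 p := rfl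
  have h512 : (512:Int) = 2 ^ 9 := by norm_num
  rw [hstart, h512, loop_pow p hp 9 10 (by norm_num)]

-- A's 10-element swap table at index si & 3 is the Gray code B computes
theorem gray_eq (si : Int) :
    PySem.List.pyGetD ([0, 1, 3, 2, 6, 7, 5, 4, 0, 0] : List Int) (PySem.Int.band si 3) 0
    = PySem.Int.bxor (PySem.Int.band si 3) (PySem.Int.band (si >>> 1) 1) := by
  rw [band3, PySem.Int.band_one]
  have hsh : si >>> (1:Int) = PySem.Int.floordiv si 2 := by
    have h := floordiv_pow2 si 1
    norm_num at h ⊢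
    rw [h]
  rw [hsh]
  rw [PySem.Int.mod_eq_emod_of_pos (by norm_num : (0:Int) < 4),
      PySem.Int.mod_eq_emod_of_pos (by norm_num : (0:Int) < 2),
      PySem.Int.floordiv_eq_ediv_of_pos (by norm_num : (0:Int) < 2)]
  have h0 : 0 ≤ si % 4 := Int.emod_nonneg si (by norm_num)
  have h1 : si % 4 < 4 := Int.emod_lt_of_pos si (by norm_num)
  have hbit : (si / 2) % 2 = (si % 4) / 2 := by omega
  rw [hbit]
  set r := si % 4 with hr
  interval_cases r <;> decide

-- swizzled pipe extraction: A's double mod equals B's low bit of the packed word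
theorem pipebank_fst (p c0 c1 s g : Int) (hp : p = 0 ∨ p = 1) (h0 : c0 = 0 ∨ c0 = 1)
    (h1 : c1 = 0 ∨ c1 = 1) (hs0 : 0 ≤ s) (hs1 : s < 8) (hg0 : 0 ≤ g) (hg1 : g < 4) :
    PySem.Int.mod (PySem.Int.mod (PySem.Int.bxor (p + 2 * PySem.Int.bor c0 (2 * c1)) s) 8) 2
    = PySem.Int.band (PySem.Int.bxor (PySem.Int.bxor (PySem.Int.bor (PySem.Int.bor p (c0 <<< 1)) (c1 <<< 2)) s) (g <<< 1)) 1 := by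
  rcases hp with rfl | rfl <;> rcases h0 with rfl | rfl <;> rcases h1 with rfl | rfl <;>
    interval_cases s <;> interval_cases g <;> decide

-- swizzled bank with the swap xor: A's floordiv-then-xor equals B's high bits of the packed word
theorem pipebank_snd (p c0 c1 s g : Int) (hp : p = 0 ∨ p = 1) (h0 : c0 = 0 ∨ c0 = 1)
    (h1 : c1 = 0 ∨ c1 = 1) (hs0 : 0 ≤ s) (hs1 : s < 8) (hg0 : 0 ≤ g) (hg1 : g < 4) :
    PySem.Int.bxor (PySem.Int.floordiv (PySem.Int.mod (PySem.Int.bxor (p + 2 * PySem.Int.bor c0 (2 * c1)) s) 8) 2) g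
    = (PySem.Int.bxor (PySem.Int.bxor (PySem.Int.bor (PySem.Int.bor p (c0 <<< 1)) (c1 <<< 2)) s) (g <<< 1)) >>> 1 := by
  rcases hp with rfl | rfl <;> rcases h0 with rfl | rfl <;> rcases h1 with rfl | rfl <;>
    interval_cases s <;> interval_cases g <;> decide

theorem gray_bounds (si : Int) :
    0 ≤ PySem.Int.bxor (PySem.Int.band si 3) (PySem.Int.band (si >>> 1) 1)
    ∧ PySem.Int.bxor (PySem.Int.band si 3) (PySem.Int.band (si >>> 1) 1) < 4 := by
  rw [← gray_eq, band3]
  have h0 : 0 ≤ PySem.Int.mod si 4 := PySem.Int.mod_nonneg si (by norm_num)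
  have h1 : PySem.Int.mod si 4 < 4 := PySem.Int.mod_lt si (by norm_num)
  set r := PySem.Int.mod si 4 with hr
  interval_cases r <;> decide

-- ===== VERDICT (by name: the statement is the Claim_ definition above) =====
theorem addr_from_coord_macrotiled_bc4_py_spec : Claim_equal_addr_from_coord_macrotiled_bc4_py := by
  intro x y pitch height pipe_swizzle bank_swizzle hdom hpre
  unfold Pre_addr_from_coord_macrotiled_bc4_py at hpre
  unfold Spec_addr_from_coord_macrotiled_bc4_py
  unfold addr_from_coord_macrotiled_bc4_py addr_from_coord_macrotiled_bc4_py_alt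
  simp only [pipeFromXY, bankFromXY]
  have hx0 : 0 ≤ PySem.Int.band x 7 := by rw [band7]; exact (mod8_bounds x).1
  have hx1 : PySem.Int.band x 7 < 8 := by rw [band7]; exact (mod8_bounds x).2
  have hy0 : 0 ≤ PySem.Int.band y 7 := by rw [band7]; exact (mod8_bounds y).1
  have hy1 : PySem.Int.band y 7 < 8 := by rw [band7]; exact (mod8_bounds y).2
  have hs0 : 0 ≤ PySem.Int.band (pipe_swizzle + 2 * bank_swizzle) 7 := by
    rw [band7]; exact (mod8_bounds _).1
  have hs1 : PySem.Int.band (pipe_swizzle + 2 * bank_swizzle) 7 < 8 := by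
    rw [band7]; exact (mod8_bounds _).2
  rw [swz (pipe_swizzle + 2 * bank_swizzle)]
  rw [pixel_eq _ _ hx0 hx1 hy0 hy1]
  -- floor divisions are shifts
  have hdx : PySem.Int.floordiv x 32 = x >>> (5:Int) := by
    rw [show (32:Int) = 2 ^ 5 by norm_num]; exact floordiv_pow2 x 5
  have hdy : PySem.Int.floordiv y 16 = y >>> (4:Int) := by
    rw [show (16:Int) = 2 ^ 4 by norm_num]; exact floordiv_pow2 y 4
  have hdp : PySem.Int.floordiv pitch 32 = pitch >>> (5:Int) := by
    rw [show (32:Int) = 2 ^ 5 by norm_num]; exact floordiv_pow2 pitch 5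
  -- the bank-swapped width is the power of two at B's shift count
  rw [bsw_eq pitch hpre]
  rw [if_pos (show ((2:Int) ^ (min 9 (PySem.Int.bitLength (2 * pitch - 1) - 1)) ≠ 0) from by positivity)]
  -- A's swap index equals B's
  have hsi : PySem.Int.floordiv (32 * PySem.Int.floordiv x 32)
      ((2:Int) ^ (min 9 (PySem.Int.bitLength (2 * pitch - 1) - 1)))
      = (32 * (x >>> (5:Int))) >>> (min 9 (PySem.Int.bitLength (2 * pitch - 1) - 1)) := by
    rw [hdx, floordiv_pow2, Int.shiftRight_natCast_right]
  rw [hsi, gray_eq]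
  obtain ⟨hg0, hg1⟩ := gray_bounds ((32 * (x >>> (5:Int))) >>> (min 9 (PySem.Int.bitLength (2 * pitch - 1) - 1)))
  rw [pipebank_fst _ _ _ _ _ (band1_cases _) (band1_cases _) (band1_cases _) hs0 hs1 hg0 hg1]
  rw [pipebank_snd _ _ _ _ _ (band1_cases _) (band1_cases _) (band1_cases _) hs0 hs1 hg0 hg1]
  -- the macro-tile byte offset: ((m*4096)+0) >>> 3 = m <<< 9
  rw [show PySem.Int.floordiv (1 * 1 * 64 * 16 * 32 + 7) 8 = (4096:Int) from by decide]
  rw [hdx, hdy, hdp, add_zero]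
  have hmo : ∀ m : Int, (m * 4096) >>> (3:Int) = m <<< (9:Int) := by
    intro m
    have h : (m * 4096) >>> (((3:Nat)):Int) = m <<< (((9:Nat)):Int) := by
      rw [Int.shiftRight_natCast_right, Int.shiftLeft_natCast_right,
        Int.shiftRight_eq_div_pow, Int.shiftLeft_eq]
      norm_num
      rw [show (4096:Int) = 512 * 8 by norm_num, ← mul_assoc]
      exact Int.mul_ediv_cancel _ (by norm_num)
    norm_num at h; exact h
  rw [hmo]
  rfl
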